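-- pv_equiv track=rewrite | github.com/MrBrantCode/unitest_baseline | mut_generate/mist_train_cf/cf_46912/solution.py | second_smallest_even_element
-- ===== SOURCE A (Python) =====
-- def second_smallest_even_element(l: list):
--     min1, min2 = None, None
--     for x in l:
--         if x % 2 == 0:
--             if min1 is None or x < min1:
--                 min2 = min1
--                 min1 = x
--             elif (min2 is None or x < min2) and x != min1:
--                 min2 = x
--     return min2
-- ===== SOURCE B (Python) =====
-- def second_smallest_even_element(l: list):
--     ev = sorted(set(x for x in l if x % 2 == 0))
--     return ev[1] if len(ev) >= 2 else None
-- ===== Notes on version B (the rewrite author's own statement) =====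
-- stated objective: simpler
-- what changed: Replaces the running min1/min2 selection scan with sort-of-deduplicated-evens and indexing the second element.
import Mathlib
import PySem

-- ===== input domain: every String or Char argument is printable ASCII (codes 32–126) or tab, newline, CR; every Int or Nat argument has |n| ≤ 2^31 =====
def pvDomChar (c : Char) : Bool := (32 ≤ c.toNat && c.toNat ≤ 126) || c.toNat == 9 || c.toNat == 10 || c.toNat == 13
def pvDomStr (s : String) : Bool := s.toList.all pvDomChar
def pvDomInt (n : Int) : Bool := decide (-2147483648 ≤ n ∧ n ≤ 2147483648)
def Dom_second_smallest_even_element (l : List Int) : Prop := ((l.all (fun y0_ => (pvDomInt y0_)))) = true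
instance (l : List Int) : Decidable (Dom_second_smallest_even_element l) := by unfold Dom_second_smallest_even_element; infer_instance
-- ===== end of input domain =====

-- B replaces A's running min1/min2 selection scan by sorting the deduplicated even
-- elements and returning the second one; objective: simpler.


-- ===== PORT A =====
-- one step of A's for-loop on the state (min1, min2)
def ssStep (st : Option Int × Option Int) (x : Int) : Option Int × Option Int :=
  if PySem.Int.mod x 2 == 0 then
    match st with
    | (none, _) => (some x, none)                 -- min2 := min1 (= None); min1 := x
    | (some a, m2) =>
      if x < a then (some x, some a)              -- min2 := min1; min1 := x
      else if ((match m2 with | none => true | some b => decide (x < b)) && (x != a)) then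
        (some a, some x)                          -- min2 := x
      else (some a, m2)
  else st

def second_smallest_even_element (l : List Int) : Option Int :=
  (l.foldl ssStep (none, none)).2

-- ===== PORT B =====
def second_smallest_even_element_alt (l : List Int) : Option Int :=
  let ev := PySem.List.sorted (PySem.Set.ofList (l.filter (fun x => PySem.Int.mod x 2 == 0))) (fun y => y) false
  if 2 ≤ ev.length then ev[1]? else none

-- ===== PRECONDITION & SPEC =====
def Spec_second_smallest_even_element (l : List Int) (out : Option Int) : Prop := out = second_smallest_even_element_alt l
instance (l : List Int) (out : Option Int) : Decidable (Spec_second_smallest_even_element l out) := by unfold Spec_second_smallest_even_element; infer_instance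

-- ===== CLAIM (what is proved, stated in full; the proofs are below) =====
def Claim_equal_second_smallest_even_element : Prop := ∀ (l : List Int), Dom_second_smallest_even_element l → Spec_second_smallest_even_element l (second_smallest_even_element l)

-- ===== LEMMAS AND PROOFS =====

-- the sorted distinct even elements of l (the list B indexes into)
def evsorted (l : List Int) : List Int :=
  PySem.List.sorted (PySem.Set.ofList (l.filter (fun x => PySem.Int.mod x 2 == 0))) (fun y => y) false

-- insertion of x into a sorted list (the effect of one even, fresh element on evsorted)
def ins (x : Int) : List Int → List Int
  | [] => [x]
  | a :: t => if x < a then x :: a :: t else a :: ins x t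

theorem ins_perm (x : Int) (s : List Int) : (ins x s).Perm (x :: s) := by
  induction s with
  | nil => simp [ins]
  | cons a t ih =>
    simp only [ins]
    split
    · exact List.Perm.refl _
    · exact (List.Perm.cons a ih).trans (List.Perm.swap x a t)

theorem ins_pairwise (x : Int) (s : List Int) (hp : s.Pairwise (· < ·)) (hx : x ∉ s) :
    (ins x s).Pairwise (· < ·) := by
  induction s with
  | nil => simp [ins]
  | cons a t ih =>
    simp only [ins]
    rcases List.pairwise_cons.mp hp with ⟨ha, ht⟩
    split
    · next h =>
      refine List.pairwise_cons.mpr ⟨?_, hp⟩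
      intro y hy
      rcases List.mem_cons.mp hy with hy | hy
      · omega
      · exact lt_trans h (ha y hy)
    · next h =>
      have hxa : a < x := by
        have : x ≠ a := by intro e; exact hx (by simp [e])
        omega
      refine List.pairwise_cons.mpr ⟨?_, ih ht (fun h' => hx (List.mem_cons_of_mem a h'))⟩
      intro y hy
      rcases List.mem_cons.mp ((ins_perm x t).mem_iff.mp hy) with hy | hy
      · omega
      · exact ha y hy

-- sorted of a deduplicated list with one fresh element appended is insertion into sorted
theorem sorted_concat_fresh (F : List Int) (x : Int) (hx : x ∉ PySem.Set.ofList F) :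
    PySem.List.sorted (PySem.Set.ofList F ++ [x]) (fun y => y) false
      = ins x (PySem.List.sorted (PySem.Set.ofList F) (fun y => y) false) := by
  apply PySem.List.sorted_eq_of_perm_of_pairwise_lt
  · exact ((ins_perm x _).trans
      ((PySem.List.sorted_perm _ _ _).cons x)).trans (List.perm_append_singleton x _).symm
  · exact ins_pairwise x _ (PySem.List.sorted_ofList_pairwise_lt F)
      (fun h => hx ((PySem.List.mem_sorted _ _ _ x).mp h))

theorem ofList_concat (F : List Int) (x : Int) :
    PySem.Set.ofList (F ++ [x]) = PySem.Set.add (PySem.Set.ofList F) x := by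
  simp [PySem.Set.ofList_eq_foldl, List.foldl_append]

-- the effect of one even, fresh element on the state, read off the sorted list
theorem ssStep_fresh (x : Int) (s : List Int) (hd : (2:Int) ∣ x)
    (hp : s.Pairwise (· < ·)) (hx : x ∉ s) :
    ssStep (s.head?, s[1]?) x = ((ins x s).head?, (ins x s)[1]?) := by
  cases s with
  | nil => simp [ssStep, hd, ins]
  | cons a t =>
    have hxa : x ≠ a := by intro e; exact hx (by simp [e])
    by_cases h1 : x < a
    · simp [ssStep, hd, ins, h1]
    · have hax : a < x := by omega
      cases t with
      | nil => simp [ssStep, hd, ins, h1, hxa]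
      | cons b t' =>
        by_cases h2 : x < b
        · simp [ssStep, hd, ins, h1, h2, hxa]
        · simp [ssStep, hd, ins, h1, h2]

-- an even element already present leaves the state unchanged
theorem ssStep_stale (x : Int) (s : List Int) (hp : s.Pairwise (· < ·)) (hx : x ∈ s) :
    ssStep (s.head?, s[1]?) x = (s.head?, s[1]?) := by
  cases s with
  | nil => simp at hx
  | cons a t =>
    rcases List.pairwise_cons.mp hp with ⟨ha, ht⟩
    have hax : a ≤ x := by
      rcases List.mem_cons.mp hx with h | h
      · omega
      · exact le_of_lt (ha x h)
    by_cases hxa : x = a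
    · simp [ssStep, hxa]
    · have hxt : x ∈ t := by
        rcases List.mem_cons.mp hx with h | h
        · exact absurd h hxa
        · exact h
      cases t with
      | nil => simp at hxt
      | cons b t' =>
        have hbx : b ≤ x := by
          rcases List.pairwise_cons.mp ht with ⟨hb, _⟩
          rcases List.mem_cons.mp hxt with h | h
          · omega
          · exact le_of_lt (hb x h)
        have h1 : ¬ x < a := by omega
        have h2 : ¬ x < b := by omega
        simp [ssStep, h1, h2]

-- loop invariant: A's state is (head, second element) of the sorted distinct evens seen so far
theorem foldl_eq_evsorted (l : List Int) :
    l.foldl ssStep (none, none) = ((evsorted l).head?, (evsorted l)[1]?) := by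
  induction l using List.reverseRecOn with
  | nil => simp [evsorted, PySem.List.sorted, PySem.Set.ofList]
  | append_singleton l x ih =>
    rw [List.foldl_append, List.foldl_cons, List.foldl_nil, ih]
    by_cases hd : (2:Int) ∣ x
    · have hF : evsorted (l ++ [x]) =
          PySem.List.sorted (PySem.Set.add (PySem.Set.ofList (l.filter (fun y => PySem.Int.mod y 2 == 0))) x) (fun y => y) false := by
        rw [evsorted, List.filter_append,
          show (List.filter (fun y => PySem.Int.mod y 2 == 0) [x]) = [x] by
            simp [PySem.Int.mod_eq_emod_of_pos, Int.emod_eq_zero_of_dvd hd],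
          ofList_concat]
      by_cases hx : x ∈ PySem.Set.ofList (l.filter (fun y => PySem.Int.mod y 2 == 0))
      · have : PySem.Set.add (PySem.Set.ofList (l.filter (fun y => PySem.Int.mod y 2 == 0))) x
            = PySem.Set.ofList (l.filter (fun y => PySem.Int.mod y 2 == 0)) := by
          simp [PySem.Set.add]
          simpa using hx
        rw [hF, this]
        exact ssStep_stale x (evsorted l) (PySem.List.sorted_ofList_pairwise_lt _)
          ((PySem.List.mem_sorted _ _ _ x).mpr hx)
      · have : PySem.Set.add (PySem.Set.ofList (l.filter (fun y => PySem.Int.mod y 2 == 0))) x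
            = PySem.Set.ofList (l.filter (fun y => PySem.Int.mod y 2 == 0)) ++ [x] := by
          simp [PySem.Set.add]
          simpa using hx
        rw [hF, this, sorted_concat_fresh _ _ hx]
        exact ssStep_fresh x (evsorted l) hd (PySem.List.sorted_ofList_pairwise_lt _)
          (fun h => hx ((PySem.List.mem_sorted _ _ _ x).mp h))
    · have : evsorted (l ++ [x]) = evsorted l := by
        simp [evsorted, List.filter_append, hd]
      rw [this]
      simp [ssStep, hd]

-- ===== VERDICT (by name: the statement is the Claim_ definition above) =====
theorem second_smallest_even_element_spec : Claim_equal_second_smallest_even_element := by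
  intro l _
  unfold Spec_second_smallest_even_element second_smallest_even_element second_smallest_even_element_alt
  rw [foldl_eq_evsorted]
  by_cases h : 2 ≤ (PySem.List.sorted (PySem.Set.ofList (l.filter (fun x => PySem.Int.mod x 2 == 0))) (fun y => y) false).length
  · simp only [evsorted]
    rw [if_pos h]
  · simp only [evsorted]
    rw [if_neg h, List.getElem?_eq_none_iff.mpr (by omega)]
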